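-- pv_equiv track=rewrite | github.com/sapanasonee/Review-Analyst-Project | src/phase2/analyzer.py | _merge_chunk_themes
-- ===== SOURCE A (Python) =====
-- MAX_THEMES = 5
--
-- def _merge_chunk_themes(all_chunk_themes: list[list[dict]]) -> list[dict]:
--     """Merge themes from multiple chunks by grouping similar names."""
--     theme_map: dict[str, dict] = {}
--     for chunk_themes in all_chunk_themes:
--         for t in chunk_themes:
--             name_lower = t["name"].lower().strip()
--             if name_lower in theme_map:
--                 existing = theme_map[name_lower]
--                 if t.get("sentiment") != existing["sentiment"]:
--                     existing["sentiment"] = "mixed"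
--                 existing["_chunk_count"] += 1
--             else:
--                 theme_map[name_lower] = {
--                     "name": t["name"],
--                     "sentiment": t.get("sentiment", "mixed"),
--                     "_chunk_count": 1,
--                 }
--     sorted_themes = sorted(theme_map.values(), key=lambda x: x["_chunk_count"], reverse=True)
--     return [{"name": t["name"], "sentiment": t["sentiment"]} for t in sorted_themes[:MAX_THEMES]]
-- ===== SOURCE B (Python) =====
-- MAX_THEMES = 5
--
-- def _merge_chunk_themes(all_chunk_themes):
--     """Group-by without a merging dict: flatten, ordered-dedup the keys, then
--     derive each group's name/sentiment/count from a per-key filter of the flat list."""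
--     flat = [t for chunk in all_chunk_themes for t in chunk]
--     keys = list(dict.fromkeys(t["name"].lower().strip() for t in flat))
--     merged = []
--     for k in keys:
--         occ = [t for t in flat if t["name"].lower().strip() == k]
--         first, rest = occ[0], occ[1:]
--         s0 = first.get("sentiment", "mixed")
--         sent = s0 if all(t.get("sentiment") == s0 for t in rest) else "mixed"
--         merged.append((first["name"], sent, len(occ)))
--     merged.sort(key=lambda g: g[2], reverse=True)
--     return [{"name": n, "sentiment": s} for n, s, _ in merged[:MAX_THEMES]]
-- ===== Notes on version B (the rewrite author's own statement) =====
-- stated objective: alternative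
-- what changed: B keeps no merging dict at all: it flattens the chunks, ordered-dedups the lowercased keys, and computes each group's name, sentiment and count by filtering the flat list per key (a staged group-by with quadratic scans instead of A's single incremental dict-update pass).
import Mathlib
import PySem

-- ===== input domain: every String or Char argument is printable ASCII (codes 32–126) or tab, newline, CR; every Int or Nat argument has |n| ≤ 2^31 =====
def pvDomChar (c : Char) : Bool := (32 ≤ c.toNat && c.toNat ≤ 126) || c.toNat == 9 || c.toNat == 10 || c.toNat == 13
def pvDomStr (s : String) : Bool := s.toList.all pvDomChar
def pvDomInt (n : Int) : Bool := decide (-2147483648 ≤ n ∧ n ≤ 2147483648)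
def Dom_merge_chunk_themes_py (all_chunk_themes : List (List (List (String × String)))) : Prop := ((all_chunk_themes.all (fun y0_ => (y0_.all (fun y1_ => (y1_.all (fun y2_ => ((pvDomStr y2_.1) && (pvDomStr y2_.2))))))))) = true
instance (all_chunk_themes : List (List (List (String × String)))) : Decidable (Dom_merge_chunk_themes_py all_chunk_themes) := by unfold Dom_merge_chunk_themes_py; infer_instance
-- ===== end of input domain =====

-- B replaces A's single incremental dict-merging pass by a staged group-by: flatten,
-- ordered-dedup of the keys, then each group's name/sentiment/count from a per-key
-- filter of the flat list; only then sort and truncate.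

-- shared accessors for the theme dicts (t["name"] / t.get("sentiment") / the lowered key)
def pvName (t : List (String × String)) : String := PySem.Dict.getD ⟨t⟩ "name" ""   -- t["name"]; Pre_ excludes the KeyError (missing "name"), where this default would fire
def pvSent? (t : List (String × String)) : Option String := PySem.Dict.get? ⟨t⟩ "sentiment"   -- t.get("sentiment")
def pvSentD (t : List (String × String)) : String := PySem.Dict.getD ⟨t⟩ "sentiment" "mixed"  -- t.get("sentiment", "mixed")
def pvKey (t : List (String × String)) : String := PySem.Str.strip (PySem.Str.lower (pvName t))   -- t["name"].lower().strip()

-- ===== PORT A =====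
-- one inner-loop body of A: update theme_map with theme t
def pvStepA (m : PySem.Dict String (String × String × Int)) (t : List (String × String)) : PySem.Dict String (String × String × Int) :=
  match m.get? (pvKey t) with
  | some existing =>
      let s' := if pvSent? t ≠ some existing.2.1 then "mixed" else existing.2.1
      m.insert (pvKey t) (existing.1, s', existing.2.2 + 1)
  | none => m.insert (pvKey t) (pvName t, pvSentD t, 1)

def merge_chunk_themes_py (all_chunk_themes : List (List (List (String × String)))) : List (List (String × String)) :=
  let theme_map : PySem.Dict String (String × String × Int) :=
    all_chunk_themes.foldl (fun m chunk_themes => chunk_themes.foldl pvStepA m) PySem.Dict.empty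
  let sorted_themes := PySem.List.sorted theme_map.values (fun x => x.2.2) true
  (PySem.List.slice sorted_themes none (some 5)).map (fun t => [("name", t.1), ("sentiment", t.2.1)])

-- ===== PORT B =====
-- one group of B: the (name, sentiment, count) summary of key k's occurrences in flat
def pvGroupB (flat : List (List (String × String))) (k : String) : String × String × Int :=
  match flat.filter (fun t => pvKey t == k) with
  | [] => ("", "", 0)   -- unreachable: every k handed in occurs in flat (occ[0] cannot fail)
  | first :: rest =>
      (pvName first,
       if rest.all (fun t => pvSent? t == some (pvSentD first)) then pvSentD first else "mixed",
       ((first :: rest).length : Int))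

def merge_chunk_themes_py_alt (all_chunk_themes : List (List (List (String × String)))) : List (List (String × String)) :=
  let flat := all_chunk_themes.flatten
  let keys := PySem.List.dedup (flat.map pvKey)
  let merged := keys.map (pvGroupB flat)
  (PySem.List.slice (PySem.List.sorted merged (fun g => g.2.2) true) none (some 5)).map
    (fun g => [("name", g.1), ("sentiment", g.2.1)])

-- ===== PRECONDITION & SPEC =====
-- Pre_ excludes exactly the themes without a "name" key, on which Python A raises KeyError.
def Pre_merge_chunk_themes_py (all_chunk_themes : List (List (List (String × String)))) : Prop :=
  ∀ chunk ∈ all_chunk_themes, ∀ t ∈ chunk, (PySem.Dict.get? (⟨t⟩ : PySem.Dict String String) "name").isSome = true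
instance (all_chunk_themes : List (List (List (String × String)))) : Decidable (Pre_merge_chunk_themes_py all_chunk_themes) := by unfold Pre_merge_chunk_themes_py; infer_instance

def pvWitness_merge_chunk_themes_py : (List (List (List (String × String)))) :=
  [[[("name", " Price"), ("sentiment", "pos")], [("name", "price")]], [[("name", "Quality"), ("sentiment", "neg")]]]

def Spec_merge_chunk_themes_py (all_chunk_themes : List (List (List (String × String)))) (out : List (List (String × String))) : Prop := out = merge_chunk_themes_py_alt all_chunk_themes
instance (all_chunk_themes : List (List (List (String × String)))) (out : List (List (String × String))) : Decidable (Spec_merge_chunk_themes_py all_chunk_themes out) := by unfold Spec_merge_chunk_themes_py; infer_instance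

-- ===== CLAIM (what is proved, stated in full; the proofs are below) =====
def Claim_equal_merge_chunk_themes_py : Prop := ∀ (all_chunk_themes : List (List (List (String × String)))), Dom_merge_chunk_themes_py all_chunk_themes → Pre_merge_chunk_themes_py all_chunk_themes → Spec_merge_chunk_themes_py all_chunk_themes (merge_chunk_themes_py all_chunk_themes)

-- ===== LEMMAS AND PROOFS =====

-- get? of a dict whose items are (k, f k) over a key list
lemma pvGet?_map (ks : List String) (f : String → String × String × Int) (k : String) :
    (PySem.Dict.mk (ks.map (fun k' => (k', f k')))).get? k
      = if k ∈ ks then some (f k) else none := by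
  induction ks with
  | nil => rfl
  | cons a rest ih =>
    simp only [List.map_cons, PySem.Dict.get?_mk_cons, ih, List.mem_cons]
    by_cases ha : a = k
    · subst ha; simp
    · have : (a == k) = false := by simpa using ha
      have hka : ¬ k = a := fun h => ha h.symm
      simp [this, hka]

-- the sentiment summary absorbs one more occurrence exactly like A's sequential update
lemma pvSent_step (s0 : String) (rest : List (List (String × String))) (t : List (String × String)) :
    (if (rest ++ [t]).all (fun u => pvSent? u == some s0) then s0 else "mixed")
      = (if pvSent? t ≠ some (if rest.all (fun u => pvSent? u == some s0) then s0 else "mixed")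
         then "mixed" else (if rest.all (fun u => pvSent? u == some s0) then s0 else "mixed")) := by
  by_cases hall : rest.all (fun u => pvSent? u == some s0) = true
  · by_cases ht : pvSent? t = some s0
    · simp [List.all_append, hall, ht]
    · have htb : (pvSent? t == some s0) = false := by simpa using ht
      simp [List.all_append, hall, htb, ht]
  · have hall' : rest.all (fun u => pvSent? u == some s0) = false := by simpa using hall
    simp [List.all_append, hall']

-- the key invariant of A's fold: its items are B's group-by, keyed and in first-seen order
lemma pvInv (l : List (List (String × String))) :
    (l.foldl pvStepA PySem.Dict.empty).items
      = (PySem.List.dedup (l.map pvKey)).map (fun k => (k, pvGroupB l k)) := by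
  induction l using List.reverseRecOn with
  | nil => rfl
  | append_singleton l t ih =>
    rw [List.foldl_append, List.foldl_cons, List.foldl_nil, List.map_append, List.map_cons,
      List.map_nil]
    set mA := l.foldl pvStepA PySem.Dict.empty with hmA
    set ks := PySem.List.dedup (l.map pvKey) with hks
    have hmAeq : mA = ⟨ks.map (fun k => (k, pvGroupB l k))⟩ := congrArg PySem.Dict.mk ih
    have hded : PySem.List.dedup (l.map pvKey ++ [pvKey t])
        = if (pvKey t ∈ ks) then ks else ks ++ [pvKey t] := by
      have hadd : PySem.List.dedup (l.map pvKey ++ [pvKey t]) = PySem.Set.add ks (pvKey t) := by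
        rw [hks]
        unfold PySem.List.dedup PySem.Set.ofList
        rw [List.foldl_append, List.foldl_cons, List.foldl_nil]
      rw [hadd]
      unfold PySem.Set.add
      by_cases hmem : pvKey t ∈ ks
      · rw [if_pos ((PySem.Set.contains_iff _ _).mpr hmem), if_pos hmem]
      · rw [if_neg (fun h => hmem ((PySem.Set.contains_iff _ _).mp h)), if_neg hmem]
    have hmemiff : pvKey t ∈ ks ↔ pvKey t ∈ l.map pvKey := by
      rw [hks]; exact PySem.List.mem_dedup _ _
    have hgrp_ne : ∀ k, k ≠ pvKey t → pvGroupB (l ++ [t]) k = pvGroupB l k := by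
      intro k hk
      unfold pvGroupB
      rw [List.filter_append, List.filter_cons, List.filter_nil]
      have : (pvKey t == k) = false := by simpa using fun h => hk h.symm
      simp [this]
    by_cases hmem : pvKey t ∈ ks
    · -- key already present: A updates in place, B's groups gain one occurrence
      have hfne : l.filter (fun u => pvKey u == pvKey t) ≠ [] := by
        rw [Ne, List.filter_eq_nil_iff]
        intro hnone
        obtain ⟨u, hu, hku⟩ := List.mem_map.mp (hmemiff.mp hmem)
        exact hnone u hu (by simpa using hku)
      obtain ⟨f, rest, hfr⟩ : ∃ f rest, l.filter (fun u => pvKey u == pvKey t) = f :: rest := by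
        cases h : l.filter (fun u => pvKey u == pvKey t) with
        | nil => exact absurd h hfne
        | cons f rest => exact ⟨f, rest, rfl⟩
      have hget : mA.get? (pvKey t) = some (pvGroupB l (pvKey t)) := by
        rw [hmAeq, pvGet?_map, if_pos hmem]
      have hcont : mA.contains (pvKey t) = true := by
        rw [PySem.Dict.contains_eq_isSome_get?, hget]; rfl
      unfold pvStepA
      rw [hget]
      simp only
      rw [PySem.Dict.items_insert_of_contains _ _ hcont, hmAeq, hded, if_pos hmem]
      simp only [List.map_map]
      apply List.map_congr_left
      intro k hkmem
      by_cases hk : k = pvKey t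
      · rw [hk]
        simp only [Function.comp_apply, beq_self_eq_true, if_true]
        have hfilt : (l ++ [t]).filter (fun u => pvKey u == pvKey t) = f :: (rest ++ [t]) := by
          rw [List.filter_append, hfr, List.filter_cons, List.filter_nil]
          simp
        unfold pvGroupB
        rw [hfilt, hfr]
        simp only
        refine Prod.ext rfl (Prod.ext rfl (Prod.ext ?_ ?_))
        · exact (pvSent_step (pvSentD f) rest t).symm
        · show ((f :: rest).length : Int) + 1 = ((f :: (rest ++ [t])).length : Int)
          simp only [List.length_cons, List.length_append, List.length_nil]
          push_cast; omega
      · have : (k == pvKey t) = false := by simpa using hk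
        simp only [Function.comp_apply, this, Bool.false_eq_true, if_false]
        rw [hgrp_ne k hk]
    · -- new key: A appends a fresh entry, B's dedup gains the key at the end
      have hget : mA.get? (pvKey t) = none := by
        rw [hmAeq, pvGet?_map, if_neg hmem]
      have hcont : mA.contains (pvKey t) = false := by
        rw [PySem.Dict.contains_eq_isSome_get?, hget]; rfl
      unfold pvStepA
      rw [hget]
      simp only
      rw [PySem.Dict.items_insert_of_not_contains _ _ hcont, hmAeq, hded, if_neg hmem,
        List.map_append, List.map_cons, List.map_nil]
      congr 1
      · apply List.map_congr_left
        intro k hkmem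
        rw [hgrp_ne k (fun h => hmem (h ▸ hkmem))]
      · have hfilt0 : l.filter (fun u => pvKey u == pvKey t) = [] := by
          rw [List.filter_eq_nil_iff]
          intro u hu hku
          exact hmem (hmemiff.mpr (List.mem_map.mpr ⟨u, hu, by simpa using hku⟩))
        have hfilt : (l ++ [t]).filter (fun u => pvKey u == pvKey t) = [t] := by
          rw [List.filter_append, hfilt0, List.filter_cons, List.filter_nil]
          simp
        unfold pvGroupB
        rw [hfilt]
        simp

-- ===== VERDICT (by name: the statement is the Claim_ definition above) =====
theorem merge_chunk_themes_py_spec : Claim_equal_merge_chunk_themes_py := by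
  intro all _ _
  unfold Spec_merge_chunk_themes_py merge_chunk_themes_py merge_chunk_themes_py_alt
  have hfold : all.foldl (fun m chunk_themes => chunk_themes.foldl pvStepA m) PySem.Dict.empty
      = all.flatten.foldl pvStepA PySem.Dict.empty := by
    rw [List.foldl_flatten]
  have hinv := pvInv all.flatten
  have hvals : (all.foldl (fun m chunk_themes => chunk_themes.foldl pvStepA m) PySem.Dict.empty).values
      = (PySem.List.dedup (all.flatten.map pvKey)).map (pvGroupB all.flatten) := by
    rw [hfold]
    simp only [PySem.Dict.values, hinv, List.map_map]
    rfl
  simp only [hvals]
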